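-- pv_equiv track=rewrite | github.com/mbrown007/botcheck | services/agent/src/scenario_ai_loop.py | _ai_stop_signal
-- ===== SOURCE A (Python) =====
-- def _normalize(text: str) -> str:
--     return " ".join((text or "").strip().lower().split())
--
-- def _ai_stop_signal(bot_text: str) -> bool:
--     normalized = _normalize(bot_text)
--     if not normalized:
--         return False
--     stop_markers = (
--         "goodbye",
--         "bye",
--         "thanks for calling",
--         "thank you for calling",
--         "have a great day",
--         "anything else i can help",
--     )
--     return any(marker in normalized for marker in stop_markers)
-- ===== SOURCE B (Python) =====
-- _STOP_MARKERS = (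
--     "goodbye",
--     "bye",
--     "thanks for calling",
--     "thank you for calling",
--     "have a great day",
--     "anything else i can help",
-- )
--
--
-- def _ai_stop_signal(bot_text: str) -> bool:
--     # Normalize in a single character pass: lowercase, collapse whitespace
--     # runs to single spaces, trim the edges.
--     out = []
--     for ch in (bot_text or ""):
--         if ch.isspace():
--             if out and out[-1] != " ":
--                 out.append(" ")
--         else:
--             out.append(ch.lower())
--     if out and out[-1] == " ":
--         out.pop()
--     normalized = "".join(out)
--     # Single left-to-right scan: does any marker start at position i?
--     for i in range(len(normalized)):
--         for marker in _STOP_MARKERS: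
--             if normalized.startswith(marker, i):
--                 return True
--     return False
-- ===== Notes on version B (the rewrite author's own statement) =====
-- stated objective: alternative
-- what changed: B normalizes in one explicit character pass (lowercasing, collapsing whitespace runs to single spaces, trimming as it goes) instead of strip/lower/split/join, and detects a marker with a single left-to-right scan over positions testing whether any marker starts at each index, instead of an independent substring search per marker.
import Mathlib
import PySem

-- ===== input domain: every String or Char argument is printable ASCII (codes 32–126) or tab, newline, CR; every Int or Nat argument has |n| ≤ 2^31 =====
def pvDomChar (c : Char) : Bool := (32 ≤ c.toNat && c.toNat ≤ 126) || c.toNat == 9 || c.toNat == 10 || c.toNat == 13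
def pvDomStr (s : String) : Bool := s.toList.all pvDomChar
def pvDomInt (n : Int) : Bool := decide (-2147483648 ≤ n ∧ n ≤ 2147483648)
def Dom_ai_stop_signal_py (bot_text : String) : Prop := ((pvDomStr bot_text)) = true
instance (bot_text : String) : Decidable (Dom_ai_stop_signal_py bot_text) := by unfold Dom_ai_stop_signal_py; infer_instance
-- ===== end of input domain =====

-- B replaces strip/lower/split/join + per-marker 'in' scans by one explicit normalization pass
-- and one left-to-right position scan testing startswith; alternative decomposition, no speed claim.

-- the stop-marker tuple (module-level data shared by both sources)
def pvStopMarkers : List String :=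
  ["goodbye", "bye", "thanks for calling", "thank you for calling",
   "have a great day", "anything else i can help"]

-- ===== PORT A =====
-- _normalize: " ".join((text or "").strip().lower().split())
def ai_stop_signal_normalize (text : String) : String :=
  PySem.Str.join " "
    (PySem.Str.split₀ (PySem.Str.lower (PySem.Str.strip (if text == "" then "" else text))))

def ai_stop_signal_py (bot_text : String) : Bool :=
  let normalized := ai_stop_signal_normalize bot_text
  if normalized == "" then false
  else pvStopMarkers.any fun marker => PySem.Str.isIn marker normalized

-- ===== PORT B =====
-- one iteration of B's normalization loop body
def pvBStep (out : List Char) (ch : Char) : List Char :=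
  if PySem.Chars.isspace ch then
    if !out.isEmpty && out.getLast? != some ' ' then out ++ [' '] else out
  else out ++ [PySem.Chars.lowerChar ch]

-- 'if out and out[-1] == " ": out.pop()'
def pvBTrim (out : List Char) : List Char :=
  if !out.isEmpty && out.getLast? == some ' ' then out.dropLast else out

def ai_stop_signal_py_alt (bot_text : String) : Bool :=
  let out := ((if bot_text == "" then "" else bot_text).toList).foldl pvBStep []
  let normalized := pvBTrim out   -- ''.join(out): the resulting character list
  (List.range normalized.length).any fun i =>
    pvStopMarkers.any fun marker => PySem.Chars.startswith (normalized.drop i) marker.toList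

-- ===== PRECONDITION & SPEC =====
def Spec_ai_stop_signal_py (bot_text : String) (out : Bool) : Prop := out = ai_stop_signal_py_alt bot_text
instance (bot_text : String) (out : Bool) : Decidable (Spec_ai_stop_signal_py bot_text out) := by unfold Spec_ai_stop_signal_py; infer_instance

-- ===== CLAIM (what is proved, stated in full; the proofs are below) =====
def Claim_equal_ai_stop_signal_py : Prop := ∀ (bot_text : String), Dom_ai_stop_signal_py bot_text → Spec_ai_stop_signal_py bot_text (ai_stop_signal_py bot_text)

-- ===== LEMMAS AND PROOFS =====

-- lowerChar only moves 'A'..'Z' (codes 65..90) to 97..122, so it never creates or destroys whitespace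
theorem pv_isspace_lowerChar (c : Char) :
    PySem.Chars.isspace (PySem.Chars.lowerChar c) = PySem.Chars.isspace c := by
  unfold PySem.Chars.lowerChar
  split
  · rename_i h
    have hb : 65 ≤ c.toNat ∧ c.toNat ≤ 90 := by
      simp only [PySem.Chars.isupper, Bool.and_eq_true, decide_eq_true_eq] at h
      exact ⟨h.1, h.2⟩
    have hv : (Char.ofNat (c.toNat + 32)).toNat = c.toNat + 32 := by
      have : Nat.isValidChar (c.toNat + 32) := Or.inl (by omega)
      simp [Char.ofNat, this]
    simp only [PySem.Chars.isspace, hv]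
    rw [Bool.eq_iff_iff]
    simp only [Bool.or_eq_true, Bool.and_eq_true, decide_eq_true_eq]
    omega
  · rfl

theorem pv_lowerChar_ne_space {c : Char} (h : PySem.Chars.isspace c = false) :
    PySem.Chars.lowerChar c ≠ ' ' := by
  intro e
  have h2 := pv_isspace_lowerChar c
  rw [e, h] at h2
  exact absurd h2 (by decide)

-- the words of a string, with pending (reversed) current word cur: split₀.go without its accumulator
def pvWords : List Char → List Char → List (List Char)
  | cur, [] => if cur.isEmpty then [] else [cur.reverse]
  | cur, c :: rest =>
    if PySem.Chars.isspace c then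
      (if cur.isEmpty then [] else [cur.reverse]) ++ pvWords [] rest
    else pvWords (c :: cur) rest

theorem pv_go_eq : ∀ (s cur : List Char) (acc : List (List Char)),
    PySem.Chars.split₀.go s cur acc = acc.reverse ++ pvWords cur s := by
  intro s
  induction s with
  | nil =>
    intro cur acc
    unfold PySem.Chars.split₀.go pvWords
    split
    · simp
    · simp
  | cons c rest ih =>
    intro cur acc
    unfold PySem.Chars.split₀.go pvWords
    split
    · split
      · rw [ih]; simp
      · rw [ih]; simp
    · exact ih _ _

theorem pv_split₀_eq (s : List Char) : PySem.Chars.split₀ s = pvWords [] s := by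
  unfold PySem.Chars.split₀
  rw [pv_go_eq]
  simp

-- what B's loop appends after a given prefix; b = "out is nonempty and does not end in a space"
def pvG : List Char → Bool → List Char
  | [], _ => []
  | c :: rest, b =>
    if PySem.Chars.isspace c then
      if b then ' ' :: pvG rest false else pvG rest false
    else PySem.Chars.lowerChar c :: pvG rest true

theorem pv_foldl_eq : ∀ (s out : List Char),
    s.foldl pvBStep out = out ++ pvG s (!out.isEmpty && out.getLast? != some ' ') := by
  intro s
  induction s with
  | nil => intro out; simp [pvG]
  | cons c rest ih =>
    intro out
    rw [List.foldl_cons]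
    by_cases hc : PySem.Chars.isspace c = true
    · by_cases hf : (!out.isEmpty && out.getLast? != some ' ') = true
      · have hstep : pvBStep out c = out ++ [' '] := by
          unfold pvBStep; rw [if_pos hc, if_pos hf]
        have h2 : (!(out ++ [' ']).isEmpty && (out ++ [' ']).getLast? != some ' ') = false := by
          simp
        rw [hstep, ih, h2, hf]
        simp [pvG, hc]
      · have hf' : (!out.isEmpty && out.getLast? != some ' ') = false := eq_false_of_ne_true hf
        have hstep : pvBStep out c = out := by
          unfold pvBStep; rw [if_pos hc, if_neg hf]
        rw [hstep, ih, hf']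
        simp [pvG, hc]
    · have hc' : PySem.Chars.isspace c = false := eq_false_of_ne_true hc
      have hstep : pvBStep out c = out ++ [PySem.Chars.lowerChar c] := by
        unfold pvBStep; rw [if_neg (by simp [hc'])]
      have h2 : (!(out ++ [PySem.Chars.lowerChar c]).isEmpty
          && (out ++ [PySem.Chars.lowerChar c]).getLast? != some ' ') = true := by
        simp [pv_lowerChar_ne_space hc']
      rw [hstep, ih, h2]
      simp [pvG, hc']

theorem pv_words_ne_nil : ∀ (s cur : List Char), cur ≠ [] → pvWords cur s ≠ [] := by
  intro s
  induction s with
  | nil => intro cur h; simp [pvWords, h]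
  | cons c rest ih =>
    intro cur h
    simp only [pvWords]
    split
    · simp [h]
    · exact ih _ (by simp)

theorem pv_words_nil_iff : ∀ (s : List Char),
    pvWords [] s = [] ↔ ∀ c ∈ s, PySem.Chars.isspace c = true := by
  intro s
  induction s with
  | nil => simp [pvWords]
  | cons c rest ih =>
    by_cases hc : PySem.Chars.isspace c = true
    · simp [pvWords, hc, ih]
    · simp only [pvWords, if_neg hc]
      constructor
      · intro h; exact absurd h (pv_words_ne_nil _ _ (by simp))
      · intro h; exact absurd (h c (by simp)) hc

theorem pv_G_false_nil_iff : ∀ (s : List Char),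
    pvG s false = [] ↔ ∀ c ∈ s, PySem.Chars.isspace c = true := by
  intro s
  induction s with
  | nil => simp [pvG]
  | cons c rest ih =>
    by_cases hc : PySem.Chars.isspace c = true
    · simp [pvG, hc, ih]
    · simp [pvG, hc]

theorem pv_trim_append {a b : List Char} (hb : b ≠ []) : pvBTrim (a ++ b) = a ++ pvBTrim b := by
  have h1 : (a ++ b).getLast? = b.getLast? := by
    cases e : b.getLast? with
    | none => exact absurd (List.getLast?_eq_none_iff.mp e) hb
    | some x => simp [List.getLast?_append, e]
  have h2 : (a ++ b).isEmpty = false := by simp [hb]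
  have h3 : b.isEmpty = false := by simp [hb]
  unfold pvBTrim
  rw [h1, h2, h3]
  simp only [Bool.not_false, Bool.true_and]
  by_cases hl : (b.getLast? == some ' ') = true
  · rw [if_pos hl, if_pos hl, List.dropLast_append_of_ne_nil hb]
  · rw [if_neg (by simp_all), if_neg (by simp_all)]

theorem pv_trim_concat_space (a : List Char) : pvBTrim (a ++ [' ']) = a := by
  unfold pvBTrim
  rw [if_pos (by simp)]
  simp

theorem pv_trim_no_space {a : List Char} (h : a.getLast? ≠ some ' ') : pvBTrim a = a := by
  unfold pvBTrim
  rw [if_neg (by simp [h])]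

-- the heart: B's rendered loop output, trimmed, is " ".join of the lowered words
theorem pv_key : ∀ (s cur : List Char), (∀ c ∈ cur, PySem.Chars.isspace c = false) →
    pvBTrim ((cur.reverse.map PySem.Chars.lowerChar) ++ pvG s (!cur.isEmpty)) =
      PySem.Chars.join [' '] ((pvWords cur s).map (List.map PySem.Chars.lowerChar)) := by
  intro s
  induction s with
  | nil =>
    intro cur hcur
    cases cur with
    | nil => simp [pvG, pvWords, pvBTrim, PySem.Chars.join_nil]
    | cons d cur' =>
      have hlast : ((d :: cur').reverse.map PySem.Chars.lowerChar).getLast? ≠ some ' ' := by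
        rw [List.getLast?_map, List.getLast?_reverse]
        simp only [List.head?_cons, Option.map_some]
        intro e
        exact pv_lowerChar_ne_space (hcur d (by simp)) (by simpa using e)
      rw [show pvG [] (!(d :: cur').isEmpty) = [] from rfl, List.append_nil,
        pv_trim_no_space hlast,
        show pvWords (d :: cur') [] = [(d :: cur').reverse] from rfl,
        List.map_cons, List.map_nil, PySem.Chars.join_singleton]
  | cons c rest ih =>
    intro cur hcur
    by_cases hc : PySem.Chars.isspace c = true
    · cases cur with
      | nil =>
        have e1 : pvG (c :: rest) (!([] : List Char).isEmpty) = pvG rest false := by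
          simp [pvG, hc]
        have e2 : pvWords [] (c :: rest) = pvWords [] rest := by simp [pvWords, hc]
        rw [e1, e2]
        simpa using ih [] (by simp)
      | cons d cur' =>
        have e1 : pvG (c :: rest) (!(d :: cur').isEmpty) = ' ' :: pvG rest false := by
          simp [pvG, hc]
        have e2 : pvWords (d :: cur') (c :: rest) = (d :: cur').reverse :: pvWords [] rest := by
          simp [pvWords, hc]
        rw [e1, e2]
        by_cases hr : pvWords [] rest = []
        · have hg : pvG rest false = [] := by
            rw [pv_G_false_nil_iff]; exact (pv_words_nil_iff rest).mp hr
          rw [hg, hr, show (' ' :: ([] : List Char)) = [' '] from rfl,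
            pv_trim_concat_space, List.map_cons, List.map_nil, PySem.Chars.join_singleton]
        · have hg : pvG rest false ≠ [] := fun e =>
            hr ((pv_words_nil_iff rest).mpr ((pv_G_false_nil_iff rest).mp e))
          obtain ⟨w, ws, hws⟩ : ∃ w ws, pvWords [] rest = w :: ws := by
            cases e : pvWords [] rest with
            | nil => exact absurd e hr
            | cons w ws => exact ⟨w, ws, rfl⟩
          have hIH := ih [] (by simp)
          simp only [List.reverse_nil, List.map_nil, List.isEmpty_nil, Bool.not_true,
            List.nil_append] at hIH
          rw [show (' ' :: pvG rest false) = [' '] ++ pvG rest false from rfl,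
            ← List.append_assoc, pv_trim_append hg, hIH, hws]
          simp [PySem.Chars.join_cons_cons, List.append_assoc]
    · have hc' : PySem.Chars.isspace c = false := eq_false_of_ne_true hc
      have e1 : pvG (c :: rest) (!cur.isEmpty) = PySem.Chars.lowerChar c :: pvG rest true := by
        simp [pvG, hc']
      have e2 : pvWords cur (c :: rest) = pvWords (c :: cur) rest := by
        simp [pvWords, hc']
      rw [e1, e2]
      have e3 : (cur.reverse.map PySem.Chars.lowerChar) ++
          (PySem.Chars.lowerChar c :: pvG rest true) =
          ((c :: cur).reverse.map PySem.Chars.lowerChar) ++ pvG rest (!(c :: cur).isEmpty) := by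
        simp
      rw [e3]
      refine ih (c :: cur) ?_
      intro x hx
      rcases List.mem_cons.mp hx with h | h
      · exact h ▸ hc'
      · exact hcur x h

-- lowering commutes with word splitting (lowerChar preserves whitespace)
theorem pv_words_lower : ∀ (s cur : List Char),
    pvWords (cur.map PySem.Chars.lowerChar) (s.map PySem.Chars.lowerChar) =
      (pvWords cur s).map (List.map PySem.Chars.lowerChar) := by
  intro s
  induction s with
  | nil =>
    intro cur
    simp only [List.map_nil, pvWords, List.isEmpty_map]
    split
    · simp
    · simp
  | cons c rest ih =>
    intro cur
    simp only [List.map_cons, pvWords, pv_isspace_lowerChar]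
    split
    · have h0 := ih []
      simp only [List.map_nil] at h0
      rw [h0]
      simp only [List.map_append, List.isEmpty_map]
      split
      · simp
      · simp
    · exact (by simpa using ih (c :: cur))

theorem pv_words_dropWhile : ∀ (s : List Char),
    pvWords [] (List.dropWhile PySem.Chars.isspace s) = pvWords [] s := by
  intro s
  induction s with
  | nil => rfl
  | cons c rest ih =>
    by_cases hc : PySem.Chars.isspace c = true
    · rw [List.dropWhile_cons_of_pos hc, ih]
      simp [pvWords, hc]
    · rw [List.dropWhile_cons_of_neg (by simp_all)]

theorem pv_words_concat_space : ∀ (s cur : List Char) (c : Char),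
    PySem.Chars.isspace c = true → pvWords cur (s ++ [c]) = pvWords cur s := by
  intro s
  induction s with
  | nil => intro cur c hc; simp [pvWords, hc]
  | cons d rest ih =>
    intro cur c hc
    simp only [List.cons_append, pvWords]
    split
    · rw [ih _ _ hc]
    · exact ih _ _ hc

theorem pv_words_append_spaces : ∀ (t s cur : List Char),
    (∀ c ∈ t, PySem.Chars.isspace c = true) → pvWords cur (s ++ t) = pvWords cur s := by
  intro t
  induction t with
  | nil => simp
  | cons c t' ih =>
    intro s cur h
    have e : s ++ c :: t' = (s ++ [c]) ++ t' := by simp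
    rw [e, ih _ _ (fun x hx => h x (by simp [hx])),
      pv_words_concat_space _ _ _ (h c (by simp))]

theorem pv_words_strip (s : List Char) :
    pvWords [] (PySem.Chars.strip s) = pvWords [] s := by
  unfold PySem.Chars.strip PySem.Chars.rstrip PySem.Chars.lstrip
  set x := List.dropWhile PySem.Chars.isspace s with hx
  have hsplit : x = (List.dropWhile PySem.Chars.isspace x.reverse).reverse ++
      (List.takeWhile PySem.Chars.isspace x.reverse).reverse := by
    conv_lhs => rw [← List.reverse_reverse x,
      ← List.takeWhile_append_dropWhile (p := PySem.Chars.isspace) (l := x.reverse)]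
    rw [List.reverse_append]
  calc pvWords [] (List.dropWhile PySem.Chars.isspace x.reverse).reverse
      = pvWords [] ((List.dropWhile PySem.Chars.isspace x.reverse).reverse ++
          (List.takeWhile PySem.Chars.isspace x.reverse).reverse) := by
        rw [pv_words_append_spaces]
        intro c hc
        exact List.mem_takeWhile_imp (List.mem_reverse.mp hc)
    _ = pvWords [] x := by rw [← hsplit]
    _ = pvWords [] s := pv_words_dropWhile s

-- a position scan with startswith equals per-marker substring membership
theorem pv_scan (N : List Char) (ms : List String) (hms : ∀ m ∈ ms, m.toList ≠ []) :
    ((List.range N.length).any fun i =>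
        ms.any fun m => PySem.Chars.startswith (N.drop i) m.toList)
      = ms.any fun m => PySem.Chars.isIn m.toList N := by
  rw [Bool.eq_iff_iff]
  simp only [List.any_eq_true, List.mem_range]
  constructor
  · rintro ⟨i, _, m, hm, hsw⟩
    exact ⟨m, hm, (PySem.Chars.exists_prefix_drop_iff_isIn _ _).mp
      ⟨i, (PySem.Chars.startswith_iff _ _).mp hsw⟩⟩
  · rintro ⟨m, hm, hin⟩
    obtain ⟨j, hp⟩ := (PySem.Chars.exists_prefix_drop_iff_isIn _ _).mpr hin
    refine ⟨j, ?_, m, hm, (PySem.Chars.startswith_iff _ _).mpr hp⟩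
    by_contra hj
    have hdrop : N.drop j = [] := List.drop_eq_nil_of_le (le_of_not_gt hj)
    rw [hdrop] at hp
    exact hms m hm (List.prefix_nil.mp hp)

theorem pv_or_default (s : String) : (if s == "" then "" else s) = s := by
  split
  · simp_all
  · rfl

-- ===== VERDICT (by name: the statement is the Claim_ definition above) =====
theorem ai_stop_signal_py_spec : Claim_equal_ai_stop_signal_py := by
  intro bot_text _hdom
  unfold Spec_ai_stop_signal_py
  set l := bot_text.toList with hl
  set N : List Char :=
    PySem.Chars.join [' '] ((pvWords [] l).map (List.map PySem.Chars.lowerChar)) with hN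
  have hms : ∀ m ∈ pvStopMarkers, m.toList ≠ [] := by decide
  -- Port A reduces to: some marker is a substring of N (false for N = [], markers being nonempty)
  have hA : ai_stop_signal_py bot_text
      = pvStopMarkers.any fun m => PySem.Chars.isIn m.toList N := by
    simp only [ai_stop_signal_py, ai_stop_signal_normalize]
    rw [pv_or_default]
    have hnorm : PySem.Str.join " "
        (PySem.Str.split₀ (PySem.Str.lower (PySem.Str.strip bot_text))) = String.ofList N := by
      simp only [PySem.Str.join, PySem.Str.split₀, PySem.Str.lower, PySem.Str.strip,
        String.toList_ofList, List.map_map]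
      rw [show (" " : String).toList = [' '] from rfl]
      have hid : ∀ (ws : List (List Char)),
          List.map (String.toList ∘ String.ofList) ws = ws := by
        intro ws
        induction ws with
        | nil => rfl
        | cons a t iht => simp [Function.comp, iht]
      rw [hid, hN]
      congr 1
      rw [pv_split₀_eq,
        show PySem.Chars.lower (PySem.Chars.strip l)
          = (PySem.Chars.strip l).map PySem.Chars.lowerChar from rfl]
      have hw := pv_words_lower (PySem.Chars.strip l) []
      simp only [List.map_nil] at hw
      rw [hw, pv_words_strip]
    rw [hnorm]
    by_cases hNe : N = []
    · rw [if_pos (by simp [hNe])]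
      have hz : ∀ m ∈ pvStopMarkers, PySem.Chars.isIn m.toList N = false := by
        intro m hm
        rw [hNe, PySem.Chars.isIn_eq_false_iff]
        intro hinf
        exact hms m hm (List.infix_nil.mp hinf)
      symm
      simp only [List.any_eq_false]
      intro m hm
      simp [hz m hm]
    · rw [if_neg (by simpa [String.ext_iff] using hNe)]
      simp only [PySem.Str.isIn, String.toList_ofList]
  -- Port B reduces to the position scan over the same N
  have hB : ai_stop_signal_py_alt bot_text
      = ((List.range N.length).any fun i =>
          pvStopMarkers.any fun m => PySem.Chars.startswith (N.drop i) m.toList) := by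
    simp only [ai_stop_signal_py_alt]
    rw [pv_or_default]
    have hfold : l.foldl pvBStep [] = pvG l false := by
      rw [pv_foldl_eq]; simp
    have htrim : pvBTrim (pvG l false) = N := by
      have hk := pv_key l [] (by simp)
      simpa using hk
    rw [← hl, hfold, htrim]
  rw [hA, hB, pv_scan N pvStopMarkers hms]
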